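-- pv_equiv track=rewrite | github.com/dankit/discord_style_sft | discord_sft/ui/pages/evals/persona_render.py | continuation_row_splits
-- ===== SOURCE A (Python) =====
-- def continuation_row_splits(n_variants: int) -> list[int]:
--     """2–3 continuations per row; balance rows (e.g. 4 → 2+2)."""
--     if n_variants <= 0:
--         return []
--     if n_variants <= 3:
--         return [n_variants]
--     if n_variants == 4:
--         return [2, 2]
--     rows: list[int] = []
--     rem = n_variants
--     while rem > 0:
--         if rem <= 3:
--             rows.append(rem)
--             break
--         if rem == 4:
--             rows.extend([2, 2])
--             break
--         rows.append(3)
--         rem -= 3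
--     return rows
-- ===== SOURCE B (Python) =====
-- def continuation_row_splits(n_variants: int) -> list[int]:
--     """2-3 continuations per row; balance rows (e.g. 4 -> 2+2)."""
--     if n_variants <= 0:
--         return []
--     if n_variants <= 3:
--         return [n_variants]
--     q, r = divmod(n_variants, 3)
--     if r == 0:
--         return [3] * q
--     if r == 2:
--         return [3] * q + [2]
--     return [3] * (q - 1) + [2, 2]
-- ===== Notes on version B (the rewrite author's own statement) =====
-- stated objective: simpler
-- what changed: Replaces A's repeated-subtraction while-loop (with tail special cases inside the loop) by a closed-form divmod(n,3) partition that picks the row list directly by remainder class.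
import Mathlib
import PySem

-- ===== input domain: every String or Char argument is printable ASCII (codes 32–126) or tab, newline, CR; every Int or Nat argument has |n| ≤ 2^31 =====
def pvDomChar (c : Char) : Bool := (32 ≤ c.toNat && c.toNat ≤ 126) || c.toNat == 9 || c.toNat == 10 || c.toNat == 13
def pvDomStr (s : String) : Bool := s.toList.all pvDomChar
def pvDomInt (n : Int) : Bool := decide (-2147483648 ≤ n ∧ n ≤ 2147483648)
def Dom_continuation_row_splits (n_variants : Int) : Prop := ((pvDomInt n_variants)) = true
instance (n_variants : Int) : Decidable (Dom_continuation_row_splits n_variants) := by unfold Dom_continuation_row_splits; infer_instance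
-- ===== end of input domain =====

-- B replaces A's repeated-subtraction while-loop by a closed-form divmod partition (objective: simpler).

-- ===== PORT A =====
-- the 'while rem > 0' loop with its 'rows' accumulator
def continuation_row_splits_loop (rem : Int) (rows : List Int) : List Int :=
  if _h : rem > 0 then
    if rem ≤ 3 then rows ++ [rem]
    else if rem = 4 then rows ++ [2, 2]
    else continuation_row_splits_loop (rem - 3) (rows ++ [3])
  else rows
termination_by rem.toNat
decreasing_by omega

def continuation_row_splits (n_variants : Int) : List Int :=
  if n_variants ≤ 0 then []
  else if n_variants ≤ 3 then [n_variants]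
  else if n_variants = 4 then [2, 2]
  else continuation_row_splits_loop n_variants []

-- ===== PORT B =====
def continuation_row_splits_alt (n_variants : Int) : List Int :=
  if n_variants ≤ 0 then []
  else if n_variants ≤ 3 then [n_variants]
  else
    let q := PySem.Int.floordiv n_variants 3
    let r := PySem.Int.mod n_variants 3
    if r = 0 then List.replicate q.toNat 3
    else if r = 2 then List.replicate q.toNat 3 ++ [2]
    else List.replicate (q - 1).toNat 3 ++ [2, 2]

-- ===== PRECONDITION & SPEC =====
def Spec_continuation_row_splits (n_variants : Int) (out : List Int) : Prop := out = continuation_row_splits_alt n_variants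
instance (n_variants : Int) (out : List Int) : Decidable (Spec_continuation_row_splits n_variants out) := by unfold Spec_continuation_row_splits; infer_instance

-- ===== CLAIM (what is proved, stated in full; the proofs are below) =====
def Claim_equal_continuation_row_splits : Prop := ∀ (n_variants : Int), Dom_continuation_row_splits n_variants → Spec_continuation_row_splits n_variants (continuation_row_splits n_variants)

-- ===== LEMMAS AND PROOFS =====

-- the divmod partition peels one row of 3 as long as at least 5 remain
lemma alt_step (n : Int) (h : 5 ≤ n) :
    continuation_row_splits_alt n = 3 :: continuation_row_splits_alt (n - 3) := by
  by_cases h2 : n ≤ 7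
  · interval_cases n <;> decide
  · have h3 : (0:Int) < 3 := by norm_num
    unfold continuation_row_splits_alt
    rw [PySem.Int.floordiv_eq_ediv_of_pos h3, PySem.Int.mod_eq_emod_of_pos h3,
        PySem.Int.floordiv_eq_ediv_of_pos h3, PySem.Int.mod_eq_emod_of_pos h3]
    rw [if_neg (show ¬ n ≤ 0 by omega), if_neg (show ¬ n ≤ 3 by omega),
        if_neg (show ¬ n - 3 ≤ 0 by omega), if_neg (show ¬ n - 3 ≤ 3 by omega)]
    have hq : n / 3 = (n - 3) / 3 + 1 := by omega
    have hr : n % 3 = (n - 3) % 3 := by omega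
    rw [hq, hr]
    have e1 : ((n - 3) / 3 + 1).toNat = ((n - 3) / 3).toNat + 1 := by omega
    have e2 : ((n - 3) / 3 + 1 - 1).toNat = ((n - 3) / 3 - 1).toNat + 1 := by omega
    have hc : (n - 3) % 3 = 0 ∨ (n - 3) % 3 = 1 ∨ (n - 3) % 3 = 2 := by omega
    rcases hc with hc | hc | hc
    · simp [hc, e1, List.replicate_succ]
    · simp only [hc, e2]
      rw [if_neg (by norm_num), if_neg (by norm_num), if_neg (by norm_num), if_neg (by norm_num)]
      rw [List.replicate_succ]
      simp
    · simp [hc, e1, List.replicate_succ]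

lemma alt_four : continuation_row_splits_alt 4 = [2, 2] := by decide

lemma loop_eq (k : Nat) : ∀ (rem : Int), rem.toNat ≤ k → 0 < rem → ∀ rows,
    continuation_row_splits_loop rem rows = rows ++ continuation_row_splits_alt rem := by
  induction k with
  | zero => intro rem hk hpos; omega
  | succ k ih =>
    intro rem hk hpos rows
    unfold continuation_row_splits_loop
    rw [dif_pos hpos]
    by_cases h1 : rem ≤ 3
    · rw [if_pos h1]
      unfold continuation_row_splits_alt
      rw [if_neg (by omega), if_pos h1]
    · rw [if_neg h1]
      by_cases h2 : rem = 4
      · rw [if_pos h2, h2, alt_four]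
      · rw [if_neg h2]
        rw [ih (rem - 3) (by omega) (by omega)]
        rw [alt_step rem (by omega)]
        simp

-- ===== VERDICT (by name: the statement is the Claim_ definition above) =====
theorem continuation_row_splits_spec : Claim_equal_continuation_row_splits := by
  intro n _
  unfold Spec_continuation_row_splits continuation_row_splits
  by_cases h0 : n ≤ 0
  · rw [if_pos h0]; unfold continuation_row_splits_alt; rw [if_pos h0]
  · rw [if_neg h0]
    by_cases h1 : n ≤ 3
    · rw [if_pos h1]; unfold continuation_row_splits_alt; rw [if_neg h0, if_pos h1]
    · rw [if_neg h1]
      by_cases h2 : n = 4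
      · rw [if_pos h2, h2, alt_four]
      · rw [if_neg h2]
        rw [loop_eq n.toNat n (le_refl _) (by omega)]
        simp
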